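-- pv_equiv track=rewrite | github.com/Michaelliu1017/vit-boardgame-analyzer | app/backend/pipeline.py | count_units
-- ===== SOURCE A (Python) =====
-- A_KEYS    = ["ai","am","aa","at","af","atb","asb"]
--
-- D_KEYS    = ["di","dm","da","dt","df","dtb","dsb","daa"]
--
-- UNIT_TYPE_MAP = {
--     "Infantry":  {"atk": "ai",  "def": "di"},
--     "Mech":      {"atk": "am",  "def": "dm"},
--     "Artillery": {"atk": "aa",  "def": "da"},
--     "Tank":      {"atk": "at",  "def": "dt"},
--     "Fighter":   {"atk": "af",  "def": "df"},
--     "TacBomber": {"atk": "atb", "def": "dtb"},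
--     "StrBomber": {"atk": "asb", "def": "dsb"},
--     "AA":        {"atk": None,  "def": "daa"},
-- }
--
-- def count_units(predictions, factions):
--     attacker = {v: 0 for v in A_KEYS}
--     defender = {v: 0 for v in D_KEYS}
--
--     for pred, faction in zip(predictions, factions):
--         mapping = UNIT_TYPE_MAP.get(pred)
--         if not mapping: continue
--         if faction == "JP":
--             key = mapping["atk"]
--             if key: attacker[key] += 1
--         elif faction == "US":
--             key = mapping["def"]
--             if key: defender[key] += 1
--
--     return attacker, defender
-- ===== SOURCE B (Python) =====
-- UNIT_TYPE_MAP = {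
--     "Infantry":  {"atk": "ai",  "def": "di"},
--     "Mech":      {"atk": "am",  "def": "dm"},
--     "Artillery": {"atk": "aa",  "def": "da"},
--     "Tank":      {"atk": "at",  "def": "dt"},
--     "Fighter":   {"atk": "af",  "def": "df"},
--     "TacBomber": {"atk": "atb", "def": "dtb"},
--     "StrBomber": {"atk": "asb", "def": "dsb"},
--     "AA":        {"atk": None,  "def": "daa"},
-- }
--
-- def count_units(predictions, factions):
--     pairs = list(zip(predictions, factions))
--     attacker = {}
--     defender = {}
--     for unit, m in UNIT_TYPE_MAP.items():
--         if m["atk"]: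
--             attacker[m["atk"]] = pairs.count((unit, "JP"))
--         defender[m["def"]] = pairs.count((unit, "US"))
--     return attacker, defender
-- ===== Notes on version B (the rewrite author's own statement) =====
-- stated objective: alternative
-- what changed: Replaces A's per-element loop that increments dict counters with a per-unit-type pass: each of the 8 unit types' key is assigned pairs.count((type, faction)) directly, so the dicts are built by assignment instead of incremental updates.
import Mathlib
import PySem

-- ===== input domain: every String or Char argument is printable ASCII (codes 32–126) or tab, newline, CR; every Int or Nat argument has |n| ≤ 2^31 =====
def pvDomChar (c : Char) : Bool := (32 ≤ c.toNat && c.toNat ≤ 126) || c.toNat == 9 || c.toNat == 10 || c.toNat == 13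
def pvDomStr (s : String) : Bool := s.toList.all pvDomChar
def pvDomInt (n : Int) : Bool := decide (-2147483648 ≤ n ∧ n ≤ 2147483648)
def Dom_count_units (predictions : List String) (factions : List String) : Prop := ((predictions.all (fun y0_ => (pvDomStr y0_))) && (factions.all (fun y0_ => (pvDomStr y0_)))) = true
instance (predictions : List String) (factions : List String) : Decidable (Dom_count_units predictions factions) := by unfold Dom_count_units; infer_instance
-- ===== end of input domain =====

-- B builds each count by a per-unit-type pass (pairs.count) instead of A's per-element increment loop; same cost, different traversal shape.

-- ===== PORT A =====
-- UNIT_TYPE_MAP: value is (atk : Option String, def : String)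
def pvUnitMap : PySem.Dict String (Option String × String) :=
  PySem.Dict.mk [("Infantry", (some "ai", "di")), ("Mech", (some "am", "dm")),
    ("Artillery", (some "aa", "da")), ("Tank", (some "at", "dt")),
    ("Fighter", (some "af", "df")), ("TacBomber", (some "atb", "dtb")),
    ("StrBomber", (some "asb", "dsb")), ("AA", (none, "daa"))]

-- the body of A's 'for pred, faction in zip(...)' loop
def pvStepA (st : PySem.Dict String Int × PySem.Dict String Int) (pf : String × String) :
    PySem.Dict String Int × PySem.Dict String Int :=
  match pvUnitMap.get? pf.1 with
  | none => st            -- 'if not mapping: continue'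
  | some m =>
    if pf.2 = "JP" then
      match m.1 with      -- 'key = mapping["atk"]; if key:'
      | some key => (st.1.modify key 0 (· + 1), st.2)
      | none => st
    else if pf.2 = "US" then
      (st.1, st.2.modify m.2 0 (· + 1))
    else st

def count_units (predictions : List String) (factions : List String) :
    (List (String × Int)) × (List (String × Int)) :=
  let attacker : PySem.Dict String Int :=
    (["ai","am","aa","at","af","atb","asb"]).foldl (fun d v => d.insert v 0) PySem.Dict.empty
  let defender : PySem.Dict String Int :=
    (["di","dm","da","dt","df","dtb","dsb","daa"]).foldl (fun d v => d.insert v 0) PySem.Dict.empty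
  let st := (predictions.zip factions).foldl pvStepA (attacker, defender)
  (st.1.items, st.2.items)

-- ===== PORT B =====
-- the same UNIT_TYPE_MAP constant, iterated as items() in B
def pvUnitMapList : List (String × (Option String × String)) :=
  [("Infantry", (some "ai", "di")), ("Mech", (some "am", "dm")),
    ("Artillery", (some "aa", "da")), ("Tank", (some "at", "dt")),
    ("Fighter", (some "af", "df")), ("TacBomber", (some "atb", "dtb")),
    ("StrBomber", (some "asb", "dsb")), ("AA", (none, "daa"))]

def count_units_alt (predictions : List String) (factions : List String) :
    (List (String × Int)) × (List (String × Int)) :=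
  let pairs := predictions.zip factions
  let st := pvUnitMapList.foldl
    (fun (st : PySem.Dict String Int × PySem.Dict String Int) tm =>
      let a := match tm.2.1 with
        | some k => st.1.insert k (pairs.count (tm.1, "JP") : Int)
        | none => st.1
      (a, st.2.insert tm.2.2 (pairs.count (tm.1, "US") : Int)))
    (PySem.Dict.empty, PySem.Dict.empty)
  (st.1.items, st.2.items)

-- ===== PRECONDITION & SPEC =====
def Spec_count_units (predictions : List String) (factions : List String) (out : (List (String × Int)) × (List (String × Int))) : Prop := out = count_units_alt predictions factions
instance (predictions : List String) (factions : List String) (out : (List (String × Int)) × (List (String × Int))) : Decidable (Spec_count_units predictions factions out) := by unfold Spec_count_units; infer_instance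

-- ===== CLAIM (what is proved, stated in full; the proofs are below) =====
def Claim_equal_count_units : Prop := ∀ (predictions : List String) (factions : List String), Dom_count_units predictions factions → Spec_count_units predictions factions (count_units predictions factions)

-- ===== LEMMAS AND PROOFS =====

-- invariant for A's loop: starting from dicts with the fixed key lists and arbitrary values,
-- the loop adds, at each key, the count of the corresponding (unit, faction) pair in l
set_option maxHeartbeats 2000000 in
theorem pvFoldA (l : List (String × String))
    (a1 a2 a3 a4 a5 a6 a7 d1 d2 d3 d4 d5 d6 d7 d8 : Int) :
    l.foldl pvStepA
      (PySem.Dict.mk [("ai",a1),("am",a2),("aa",a3),("at",a4),("af",a5),("atb",a6),("asb",a7)],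
       PySem.Dict.mk [("di",d1),("dm",d2),("da",d3),("dt",d4),("df",d5),("dtb",d6),("dsb",d7),("daa",d8)]) =
      (PySem.Dict.mk [("ai", a1 + l.count ("Infantry","JP")), ("am", a2 + l.count ("Mech","JP")),
         ("aa", a3 + l.count ("Artillery","JP")), ("at", a4 + l.count ("Tank","JP")),
         ("af", a5 + l.count ("Fighter","JP")), ("atb", a6 + l.count ("TacBomber","JP")),
         ("asb", a7 + l.count ("StrBomber","JP"))],
       PySem.Dict.mk [("di", d1 + l.count ("Infantry","US")), ("dm", d2 + l.count ("Mech","US")),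
         ("da", d3 + l.count ("Artillery","US")), ("dt", d4 + l.count ("Tank","US")),
         ("df", d5 + l.count ("Fighter","US")), ("dtb", d6 + l.count ("TacBomber","US")),
         ("dsb", d7 + l.count ("StrBomber","US")), ("daa", d8 + l.count ("AA","US"))]) := by
  induction l generalizing a1 a2 a3 a4 a5 a6 a7 d1 d2 d3 d4 d5 d6 d7 d8 with
  | nil => simp
  | cons hd tl ih =>
    obtain ⟨p, f⟩ := hd
    rw [List.foldl_cons]
    simp only [pvStepA, pvUnitMap, PySem.Dict.get?_mk_cons, beq_iff_eq]
    split_ifs with h1 h2 h3 h4 h5 h6 h7 h8 <;> (try subst_vars) <;>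
      simp only [PySem.Dict.modify, PySem.Dict.insert, PySem.Dict.getD, PySem.Dict.get?,
        PySem.Dict.contains, List.find?, List.any_cons, List.any_nil,
        beq_iff_eq, beq_self_eq_true, Option.map_some, Option.map_none, Option.getD_some,
        Option.getD_none, String.reduceEq, reduceCtorEq, if_true, if_false, Bool.or_eq_true,
        decide_eq_true_eq, List.map_cons, List.map_nil, or_false, false_or, or_true, true_or,
        if_pos, ite_true, ite_false, reduceIte] <;>
      (try split_ifs) <;>
      simp [*, ih, List.count_cons] <;>
      (try ring) <;>
      (try (and_intros <;> (intro hcontra; subst hcontra; simp_all)))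

-- ===== VERDICT (by name: the statement is the Claim_ definition above) =====
theorem count_units_spec : Claim_equal_count_units := by
  intro predictions factions _
  unfold Spec_count_units
  show count_units predictions factions = count_units_alt predictions factions
  simp [count_units, count_units_alt, pvUnitMapList, PySem.Dict.insert,
    PySem.Dict.contains, PySem.Dict.empty, pvFoldA]
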